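-- pv_equiv track=rewrite | github.com/gabrieldelisle/Euler-project | first.py | problem506
-- ===== SOURCE A (Python) =====
-- def problem506(m):
--    j=0
--    s=0
--    l=[1,2,3,4,3,2]
--    for i in range(1,m+1) :
--       f=0
--       v=0
--       while j>0 and f<i:
--          f=f+l[j]
--          v=(v*10+l[j])
--          j=(j+1)%6
--       g=(i-f)//15
--       for k in range(g) :
--          v=(v*10**6+123432)%123454321
--       f=f+g*15
--       while f<i:
--          f=f+l[j]
--          v=(v*10+l[j])
--          j=(j+1)%6
--
--       s=(v+s)%123454321
--    return s
-- ===== SOURCE B (Python) =====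
-- def problem506(m):
--     M = 123454321
--     PRE = (0, 1, 3, 6, 10, 13)           # digit sum of block prefix of length j
--     IDX = {0: 0, 1: 1, 3: 2, 6: 3, 10: 4, 13: 5}
--     PNUM = (0, 1, 12, 123, 1234, 12343, 123432)  # block prefix of length j as number
--     X = 10 ** 6
--     s = 0
--     j = 0          # offset inside the 6-digit block where the next chunk starts
--     for i in range(1, m + 1):
--         c = PRE[j]
--         e = (c + i) % 15
--         j2 = IDX[e]
--         if c + i < 15:
--             # chunk lies inside the current block: digits j..j2-1
--             v = (PNUM[j2] - PNUM[j] * 10 ** (j2 - j)) % M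
--         else:
--             # tail of current block, g full blocks, head of a block
--             g = (c + i - e - 15) // 15
--             v = (123432 - PNUM[j] * 10 ** (6 - j)) % M
--             p, sg = _geo(X % M, g, M)
--             v = (v * p + 123432 * sg) % M
--             v = (v * 10 ** j2 + PNUM[j2]) % M
--         j = j2
--         s = (s + v) % M
--     return s
--
-- def _geo(x, g, M):
--     """(x**g % M, (x**(g-1)+...+x+1) % M) by binary recursion."""
--     if g <= 0:
--         return (1 % M, 0)
--     p, t = _geo(x, g // 2, M)
--     p2, t2 = p * p % M, (t * p + t) % M
--     if g % 2:
--         return (p2 * x % M, (t2 * x + 1) % M)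
--     return (p2, t2)
-- ===== Notes on version B (the rewrite author's own statement) =====
-- stated objective: faster
-- what changed: B computes each chunk in closed form (block-offset tables for the within-block/tail/head parts and a binary-recursion modular geometric sum for the g repeated blocks) instead of A's digit-by-digit while loops and O(i) per-chunk loop over the g blocks.
import Mathlib
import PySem

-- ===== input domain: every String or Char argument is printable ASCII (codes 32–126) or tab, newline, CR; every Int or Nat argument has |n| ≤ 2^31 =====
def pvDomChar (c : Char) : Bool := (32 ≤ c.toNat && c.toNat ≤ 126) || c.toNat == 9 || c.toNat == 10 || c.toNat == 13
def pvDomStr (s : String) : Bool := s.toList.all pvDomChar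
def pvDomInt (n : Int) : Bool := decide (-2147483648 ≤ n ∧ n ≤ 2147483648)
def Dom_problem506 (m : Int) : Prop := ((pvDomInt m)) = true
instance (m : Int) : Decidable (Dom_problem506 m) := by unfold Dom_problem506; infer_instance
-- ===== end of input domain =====

-- B replaces A's per-chunk digit loops and per-chunk O(i) block loop by closed-form table
-- lookups plus a binary-recursion modular geometric sum (objective: faster, asymptotic).

-- ===== PORT A =====
def pvLA : List Int := [1, 2, 3, 4, 3, 2]

-- l[j] of A's loops (j is in [0,6) in every reachable state, so getD 0 is exact)
def pvDA (j : Int) : Int := (PySem.List.pyGet? pvLA j).getD 0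

-- `while j>0 and f<i:` — the `1 ≤ pvDA j` conjunct is a totality guard only; it holds in
-- every reachable state (0 ≤ j < 6), where Python's loop condition is exactly `0 < j ∧ f < i`.
def whileA1 (i f v j : Int) : Int × Int × Int :=
  if h : 0 < j ∧ f < i ∧ 1 ≤ pvDA j then
    whileA1 i (f + pvDA j) (v * 10 + pvDA j) ((j + 1) % 6)
  else (f, v, j)
termination_by (i - f).toNat
decreasing_by omega

-- `while f<i:` (same totality guard)
def whileA2 (i f v j : Int) : Int × Int × Int :=
  if h : f < i ∧ 1 ≤ pvDA j then
    whileA2 i (f + pvDA j) (v * 10 + pvDA j) ((j + 1) % 6)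
  else (f, v, j)
termination_by (i - f).toNat
decreasing_by omega

-- one iteration of A's `for i in range(1,m+1)` loop; state is (j, s)
def bodyA (st : Int × Int) (i : Int) : Int × Int :=
  let r1 := whileA1 i 0 0 st.1
  let g := PySem.Int.floordiv (i - r1.1) 15
  let v2 := (PySem.List.pyRange 0 g 1).foldl (fun v _ => (v * 10 ^ 6 + 123432) % 123454321) r1.2.1
  let r2 := whileA2 i (r1.1 + g * 15) v2 r1.2.2
  (r2.2.2, (r2.2.1 + st.2) % 123454321)

def problem506 (m : Int) : Int :=
  ((PySem.List.pyRange 1 (m + 1) 1).foldl bodyA (0, 0)).2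

-- ===== PORT B =====
def pvPRE : List Int := [0, 1, 3, 6, 10, 13]
def pvPNUM : List Int := [0, 1, 12, 123, 1234, 12343, 123432]
def pvIDX : PySem.Dict Int Int :=
  PySem.Dict.ofList [(0, 0), (1, 1), (3, 2), (6, 3), (10, 4), (13, 5)]

-- tuple/dict lookups of B (in range / present in every reachable state, so getD 0 is exact)
def pvPreB (j : Int) : Int := (PySem.List.pyGet? pvPRE j).getD 0
def pvPnumB (j : Int) : Int := (PySem.List.pyGet? pvPNUM j).getD 0
def pvIdxB (e : Int) : Int := (PySem.Dict.get? pvIDX e).getD 0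

-- _geo(x, g, M): (x**g % M, (x**(g-1)+...+x+1) % M) by binary recursion
def pvGeo (x g M : Int) : Int × Int :=
  if h : g ≤ 0 then (1 % M, 0)
  else
    let pt := pvGeo x (PySem.Int.floordiv g 2) M
    let p2 := pt.1 * pt.1 % M
    let t2 := (pt.2 * pt.1 + pt.2) % M
    if g % 2 ≠ 0 then (p2 * x % M, (t2 * x + 1) % M) else (p2, t2)
termination_by g.toNat
decreasing_by
  rw [PySem.Int.floordiv_eq_ediv_of_pos (by omega)]; omega

-- one iteration of B's `for i in range(1,m+1)` loop; state is (j, s)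
-- the `.toNat` on the exponents is a totality guard only (they are ≥ 0 in every reachable state)
def bodyB (st : Int × Int) (i : Int) : Int × Int :=
  let j := st.1
  let c := pvPreB j
  let e := (c + i) % 15
  let j2 := pvIdxB e
  let v :=
    if c + i < 15 then
      (pvPnumB j2 - pvPnumB j * 10 ^ (j2 - j).toNat) % 123454321
    else
      let g := PySem.Int.floordiv (c + i - e - 15) 15
      let v0 := (123432 - pvPnumB j * 10 ^ (6 - j).toNat) % 123454321
      let pt := pvGeo (1000000 % 123454321) g 123454321
      let v1 := (v0 * pt.1 + 123432 * pt.2) % 123454321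
      (v1 * 10 ^ j2.toNat + pvPnumB j2) % 123454321
  (j2, (st.2 + v) % 123454321)

def problem506_alt (m : Int) : Int :=
  ((PySem.List.pyRange 1 (m + 1) 1).foldl bodyB (0, 0)).2

-- ===== PRECONDITION & SPEC =====
def Spec_problem506 (m : Int) (out : Int) : Prop := out = problem506_alt m
instance (m : Int) (out : Int) : Decidable (Spec_problem506 m out) := by unfold Spec_problem506; infer_instance

-- ===== CLAIM (what is proved, stated in full; the proofs are below) =====
def Claim_equal_problem506 : Prop := ∀ (m : Int), Dom_problem506 m → Spec_problem506 m (problem506 m)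

-- ===== LEMMAS AND PROOFS =====

-- unfolding equations for the while loops
theorem whileA1_step (i f v j : Int) (h : 0 < j ∧ f < i ∧ 1 ≤ pvDA j) :
    whileA1 i f v j = whileA1 i (f + pvDA j) (v * 10 + pvDA j) ((j + 1) % 6) := by
  rw [whileA1.eq_def]; rw [dif_pos h]

theorem whileA1_stop (i f v j : Int) (h : ¬(0 < j ∧ f < i ∧ 1 ≤ pvDA j)) :
    whileA1 i f v j = (f, v, j) := by
  rw [whileA1.eq_def]; rw [dif_neg h]

theorem whileA2_step (i f v j : Int) (h1 : f < i) (h2 : 1 ≤ pvDA j) :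
    whileA2 i f v j = whileA2 i (f + pvDA j) (v * 10 + pvDA j) ((j + 1) % 6) := by
  rw [whileA2.eq_def]; rw [dif_pos ⟨h1, h2⟩]

theorem whileA2_exit (i f v j : Int) (h : i ≤ f) : whileA2 i f v j = (f, v, j) := by
  rw [whileA2.eq_def]; rw [dif_neg (by omega)]

-- table facts, all decidable
theorem step_facts (j : Int) (hj0 : 0 ≤ j) (hj6 : j < 6) :
    1 ≤ pvDA j ∧ 0 ≤ (j + 1) % 6 ∧ (j + 1) % 6 < 6 ∧
      pvPreB ((j + 1) % 6) % 15 = (pvPreB j + pvDA j) % 15 ∧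
      0 ≤ pvPreB j ∧ pvPreB j < 15 := by
  interval_cases j <;> decide

theorem pre_inj (j j2 : Int) (hj0 : 0 ≤ j) (hj6 : j < 6) (hj20 : 0 ≤ j2) (hj26 : j2 < 6)
    (h : pvPreB j = pvPreB j2) : j = j2 := by
  interval_cases j <;> interval_cases j2 <;> revert h <;> decide

theorem pre_mono (j j2 : Int) (hj0 : 0 ≤ j) (hj6 : j < 6) (hj20 : 0 ≤ j2) (hj26 : j2 < 6) :
    (pvPreB j < pvPreB j2 ↔ j < j2) := by
  interval_cases j <;> interval_cases j2 <;> decide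

theorem succ_facts (j : Int) (h0 : 0 ≤ j) (h5 : j < 5) :
    pvPreB (j + 1) = pvPreB j + pvDA j ∧ pvPnumB (j + 1) = pvPnumB j * 10 + pvDA j ∧
      (j + 1) % 6 = j + 1 ∧ 1 ≤ pvDA j := by
  interval_cases j <;> decide

theorem idx_pre (j2 : Int) (hj20 : 0 ≤ j2) (hj26 : j2 < 6) : pvIdxB (pvPreB j2) = j2 := by
  interval_cases j2 <;> decide

-- if the remaining target is reachable (alignment), a digit never overshoots it
theorem no_overshoot (j j2 r : Int) (hj0 : 0 ≤ j) (hj6 : j < 6) (hj20 : 0 ≤ j2) (hj26 : j2 < 6)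
    (hr1 : 1 ≤ r) (hrd : r < pvDA j) (hal : (r + pvPreB j) % 15 = pvPreB j2) : False := by
  interval_cases j <;> interval_cases j2 <;> simp_all [pvDA, pvPreB, pvLA, pvPRE] <;> omega

-- f is monotone along the run
theorem whileA2_f_le_aux (i : Int) (n : Nat) :
    ∀ f v j : Int, (i - f).toNat ≤ n → f ≤ (whileA2 i f v j).1 := by
  induction n with
  | zero =>
    intro f v j hn
    rw [whileA2_exit i f v j (by omega)]
  | succ n ih =>
    intro f v j hn
    by_cases h : f < i ∧ 1 ≤ pvDA j
    · rw [whileA2_step i f v j h.1 h.2]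
      have := ih (f + pvDA j) (v * 10 + pvDA j) ((j + 1) % 6) (by omega)
      omega
    · rw [whileA2.eq_def, dif_neg h]

theorem whileA2_f_le (i f v j : Int) : f ≤ (whileA2 i f v j).1 :=
  whileA2_f_le_aux i (i - f).toNat f v j le_rfl

-- A's first while is a prefix of the full run
theorem whileA1_continue_aux (i : Int) (n : Nat) :
    ∀ f v j : Int, (i - f).toNat ≤ n →
      whileA2 i f v j =
        whileA2 i (whileA1 i f v j).1 (whileA1 i f v j).2.1 (whileA1 i f v j).2.2 := by
  induction n with
  | zero =>
    intro f v j hn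
    rw [whileA1_stop i f v j (by omega)]
  | succ n ih =>
    intro f v j hn
    by_cases h : 0 < j ∧ f < i ∧ 1 ≤ pvDA j
    · rw [whileA1_step i f v j h, whileA2_step i f v j h.2.1 h.2.2]
      exact ih _ _ _ (by have := h.2.2; omega)
    · rw [whileA1_stop i f v j h]

theorem whileA1_continue (i f v j : Int) :
    whileA2 i f v j =
      whileA2 i (whileA1 i f v j).1 (whileA1 i f v j).2.1 (whileA1 i f v j).2.2 :=
  whileA1_continue_aux i (i - f).toNat f v j le_rfl

-- exit shape of A's first while (reachable states)
theorem whileA1_exit_aux (i : Int) (n : Nat) :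
    ∀ f v j : Int, (i - f).toNat ≤ n → 0 ≤ j → j < 6 →
      (0 ≤ (whileA1 i f v j).2.2 ∧ (whileA1 i f v j).2.2 < 6) ∧
        ((whileA1 i f v j).2.2 = 0 ∨ i ≤ (whileA1 i f v j).1) := by
  induction n with
  | zero =>
    intro f v j hn hj0 hj6
    rw [whileA1_stop i f v j (by omega)]
    exact ⟨⟨hj0, hj6⟩, Or.inr (show i ≤ f by omega)⟩
  | succ n ih =>
    intro f v j hn hj0 hj6
    by_cases h : 0 < j ∧ f < i ∧ 1 ≤ pvDA j
    · rw [whileA1_step i f v j h]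
      exact ih _ _ _ (by have := h.2.2; omega) (by omega) (by omega)
    · rw [whileA1_stop i f v j h]
      have hd := (step_facts j hj0 hj6).1
      refine ⟨⟨hj0, hj6⟩, ?_⟩
      by_cases hj : 0 < j
      · exact Or.inr (show i ≤ f by omega)
      · exact Or.inl (show j = 0 by omega)

theorem whileA1_exit (i f v j : Int) (hj0 : 0 ≤ j) (hj6 : j < 6) :
    (0 ≤ (whileA1 i f v j).2.2 ∧ (whileA1 i f v j).2.2 < 6) ∧
      ((whileA1 i f v j).2.2 = 0 ∨ i ≤ (whileA1 i f v j).1) :=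
  whileA1_exit_aux i (i - f).toNat f v j le_rfl hj0 hj6

-- an aligned run lands exactly on f = i and ends at the offset whose prefix sum is the target
theorem whileA2_exact_aux (i : Int) (n : Nat) :
    ∀ f v j j2 : Int, (i - f).toNat ≤ n → 0 ≤ j → j < 6 → 0 ≤ j2 → j2 < 6 → f ≤ i →
      (i - f + pvPreB j) % 15 = pvPreB j2 →
      (whileA2 i f v j).1 = i ∧ (whileA2 i f v j).2.2 = j2 := by
  induction n with
  | zero =>
    intro f v j j2 hn hj0 hj6 hj20 hj26 hfi hal
    rw [whileA2_exit i f v j (by omega)]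
    obtain ⟨-, -, -, -, h0, h15⟩ := step_facts j hj0 hj6
    obtain ⟨-, -, -, -, h0', h15'⟩ := step_facts j2 hj20 hj26
    have : pvPreB j = pvPreB j2 := by omega
    exact ⟨show f = i by omega, show j = j2 from pre_inj j j2 hj0 hj6 hj20 hj26 this⟩
  | succ n ih =>
    intro f v j j2 hn hj0 hj6 hj20 hj26 hfi hal
    by_cases hf : f < i
    · obtain ⟨hd, hr0, hr6, hpp, h0, h15⟩ := step_facts j hj0 hj6
      rw [whileA2_step i f v j hf hd]
      have hno : pvDA j ≤ i - f := by
        by_contra hlt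
        exact no_overshoot j j2 (i - f) hj0 hj6 hj20 hj26 (by omega) (by omega) hal
      refine ih (f + pvDA j) _ _ j2 (by omega) hr0 hr6 hj20 hj26 (by omega) ?_
      obtain ⟨-, -, -, -, h0', h15'⟩ := step_facts j2 hj20 hj26
      omega
    · rw [whileA2_exit i f v j (by omega)]
      obtain ⟨-, -, -, -, h0, h15⟩ := step_facts j hj0 hj6
      obtain ⟨-, -, -, -, h0', h15'⟩ := step_facts j2 hj20 hj26
      have : pvPreB j = pvPreB j2 := by omega
      exact ⟨show f = i by omega, show j = j2 from pre_inj j j2 hj0 hj6 hj20 hj26 this⟩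

theorem whileA2_exact (i f v j j2 : Int) (hj0 : 0 ≤ j) (hj6 : j < 6) (hj20 : 0 ≤ j2)
    (hj26 : j2 < 6) (hfi : f ≤ i) (hal : (i - f + pvPreB j) % 15 = pvPreB j2) :
    (whileA2 i f v j).1 = i ∧ (whileA2 i f v j).2.2 = j2 :=
  whileA2_exact_aux i (i - f).toNat f v j j2 le_rfl hj0 hj6 hj20 hj26 hfi hal

-- a numeral-friendly step lemma
theorem stepn (i f v j d j' : Int) (hd : pvDA j = d) (hj' : (j + 1) % 6 = j')
    (h1 : f < i) (h2 : 1 ≤ d) :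
    whileA2 i f v j = whileA2 i (f + d) (v * 10 + d) j' := by
  subst hd; subst hj'; exact whileA2_step i f v j h1 h2

-- consuming the rest of the current block (digits j..5)
theorem whileA2_tail (i f v j : Int) (hj0 : 0 ≤ j) (hj6 : j < 6)
    (hle : f + (15 - pvPreB j) ≤ i) :
    whileA2 i f v j =
      whileA2 i (f + (15 - pvPreB j))
        (v * 10 ^ (6 - j).toNat + (123432 - pvPnumB j * 10 ^ (6 - j).toNat)) 0 := by
  interval_cases j
  · have e1 : pvPreB 0 = 0 := by decide
    have e2 : pvPnumB 0 = 0 := by decide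
    have e3 : ((6 : Int) - 0).toNat = 6 := by decide
    rw [e1] at hle ⊢
    rw [e2, e3]
    rw [stepn i f v 0 1 1 (by decide) (by decide) (by omega) (by decide),
        stepn i _ _ 1 2 2 (by decide) (by decide) (by omega) (by decide),
        stepn i _ _ 2 3 3 (by decide) (by decide) (by omega) (by decide),
        stepn i _ _ 3 4 4 (by decide) (by decide) (by omega) (by decide),
        stepn i _ _ 4 3 5 (by decide) (by decide) (by omega) (by decide),
        stepn i _ _ 5 2 0 (by decide) (by decide) (by omega) (by decide)]
    rw [show f + 1 + 2 + 3 + 4 + 3 + 2 = f + (15 - 0) by ring,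
        show (((((v * 10 + 1) * 10 + 2) * 10 + 3) * 10 + 4) * 10 + 3) * 10 + 2 =
          v * 10 ^ 6 + (123432 - 0 * 10 ^ 6) by ring]
  · have e1 : pvPreB 1 = 1 := by decide
    have e2 : pvPnumB 1 = 1 := by decide
    have e3 : ((6 : Int) - 1).toNat = 5 := by decide
    rw [e1] at hle ⊢
    rw [e2, e3]
    rw [stepn i f v 1 2 2 (by decide) (by decide) (by omega) (by decide),
        stepn i _ _ 2 3 3 (by decide) (by decide) (by omega) (by decide),
        stepn i _ _ 3 4 4 (by decide) (by decide) (by omega) (by decide),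
        stepn i _ _ 4 3 5 (by decide) (by decide) (by omega) (by decide),
        stepn i _ _ 5 2 0 (by decide) (by decide) (by omega) (by decide)]
    rw [show f + 2 + 3 + 4 + 3 + 2 = f + (15 - 1) by ring,
        show ((((v * 10 + 2) * 10 + 3) * 10 + 4) * 10 + 3) * 10 + 2 =
          v * 10 ^ 5 + (123432 - 1 * 10 ^ 5) by ring]
  · have e1 : pvPreB 2 = 3 := by decide
    have e2 : pvPnumB 2 = 12 := by decide
    have e3 : ((6 : Int) - 2).toNat = 4 := by decide
    rw [e1] at hle ⊢
    rw [e2, e3]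
    rw [stepn i f v 2 3 3 (by decide) (by decide) (by omega) (by decide),
        stepn i _ _ 3 4 4 (by decide) (by decide) (by omega) (by decide),
        stepn i _ _ 4 3 5 (by decide) (by decide) (by omega) (by decide),
        stepn i _ _ 5 2 0 (by decide) (by decide) (by omega) (by decide)]
    rw [show f + 3 + 4 + 3 + 2 = f + (15 - 3) by ring,
        show (((v * 10 + 3) * 10 + 4) * 10 + 3) * 10 + 2 =
          v * 10 ^ 4 + (123432 - 12 * 10 ^ 4) by ring]
  · have e1 : pvPreB 3 = 6 := by decide
    have e2 : pvPnumB 3 = 123 := by decide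
    have e3 : ((6 : Int) - 3).toNat = 3 := by decide
    rw [e1] at hle ⊢
    rw [e2, e3]
    rw [stepn i f v 3 4 4 (by decide) (by decide) (by omega) (by decide),
        stepn i _ _ 4 3 5 (by decide) (by decide) (by omega) (by decide),
        stepn i _ _ 5 2 0 (by decide) (by decide) (by omega) (by decide)]
    rw [show f + 4 + 3 + 2 = f + (15 - 6) by ring,
        show ((v * 10 + 4) * 10 + 3) * 10 + 2 =
          v * 10 ^ 3 + (123432 - 123 * 10 ^ 3) by ring]
  · have e1 : pvPreB 4 = 10 := by decide
    have e2 : pvPnumB 4 = 1234 := by decide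
    have e3 : ((6 : Int) - 4).toNat = 2 := by decide
    rw [e1] at hle ⊢
    rw [e2, e3]
    rw [stepn i f v 4 3 5 (by decide) (by decide) (by omega) (by decide),
        stepn i _ _ 5 2 0 (by decide) (by decide) (by omega) (by decide)]
    rw [show f + 3 + 2 = f + (15 - 10) by ring,
        show (v * 10 + 3) * 10 + 2 = v * 10 ^ 2 + (123432 - 1234 * 10 ^ 2) by ring]
  · have e1 : pvPreB 5 = 13 := by decide
    have e2 : pvPnumB 5 = 12343 := by decide
    have e3 : ((6 : Int) - 5).toNat = 1 := by decide
    rw [e1] at hle ⊢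
    rw [e2, e3]
    rw [stepn i f v 5 2 0 (by decide) (by decide) (by omega) (by decide)]
    rw [show f + 2 = f + (15 - 13) by ring,
        show v * 10 + 2 = v * 10 ^ 1 + (123432 - 12343 * 10 ^ 1) by ring]

-- finishing inside a block: digits j..j2-1
theorem whileA2_within_aux (i : Int) (k : Nat) :
    ∀ j2 j f v : Int, (j2 - j).toNat = k → 0 ≤ j → j ≤ j2 → j2 < 6 → f ≤ i →
      i - f = pvPreB j2 - pvPreB j →
      whileA2 i f v j =
        (i, v * 10 ^ k + (pvPnumB j2 - pvPnumB j * 10 ^ k), j2) := by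
  induction k with
  | zero =>
    intro j2 j f v hk hj0 hjle hj26 hfi heq
    have hj : j = j2 := by omega
    subst hj
    rw [whileA2_exit i f v j (by omega)]
    have hf : f = i := by omega
    rw [hf]
    norm_num
  | succ k ih =>
    intro j2 j f v hk hj0 hjle hj26 hfi heq
    have hjlt : j < j2 := by omega
    obtain ⟨hpre, hpnum, hmod, hd⟩ := succ_facts j hj0 (by omega)
    have hflt : f < i := by
      have := (pre_mono j j2 hj0 (by omega) (by omega) hj26).2 hjlt
      omega
    have hple : pvPreB (j + 1) ≤ pvPreB j2 := by
      rcases lt_or_eq_of_le (by omega : j + 1 ≤ j2) with h | h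
      · have := (pre_mono (j + 1) j2 (by omega) (by omega) (by omega) hj26).2 h; omega
      · rw [h]
    rw [whileA2_step i f v j hflt hd, hmod]
    rw [ih j2 (j + 1) (f + pvDA j) (v * 10 + pvDA j) (by omega) (by omega) (by omega) hj26
        (by omega) (by omega)]
    have hval : (v * 10 + pvDA j) * 10 ^ k + (pvPnumB j2 - pvPnumB (j + 1) * 10 ^ k) =
        v * 10 ^ (k + 1) + (pvPnumB j2 - pvPnumB j * 10 ^ (k + 1)) := by
      rw [hpnum]; ring
    rw [hval]
  
theorem whileA2_within (i j2 j f v : Int) (hj0 : 0 ≤ j) (hjle : j ≤ j2) (hj26 : j2 < 6)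
    (hfi : f ≤ i) (heq : i - f = pvPreB j2 - pvPreB j) :
    whileA2 i f v j =
      (i, v * 10 ^ (j2 - j).toNat + (pvPnumB j2 - pvPnumB j * 10 ^ (j2 - j).toNat), j2) :=
  whileA2_within_aux i (j2 - j).toNat j2 j f v rfl hj0 hjle hj26 hfi heq

-- pure geometric sum 1 + X + ... + X^(n-1) for X = 10^6
def pureS : Nat → Int
  | 0 => 0
  | n + 1 => pureS n * 1000000 + 1

theorem pureS_add (a b : Nat) : pureS (a + b) = pureS a * 1000000 ^ b + pureS b := by
  induction b with
  | zero => simp [pureS]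
  | succ b ih =>
    show pureS ((a + b) + 1) = _
    rw [pureS, ih, pureS]
    ring

-- modular arithmetic helpers (M = 123454321)
theorem m_mod_mod (a : Int) : a % 123454321 % 123454321 = a % 123454321 :=
  Int.emod_emod_of_dvd a dvd_rfl

theorem m_mul_mod (a b : Int) : a % 123454321 * (b % 123454321) % 123454321 = a * b % 123454321 :=
  (Int.mul_emod a b _).symm

theorem m_absorb_l (a b c : Int) :
    (a % 123454321 * b + c) % 123454321 = (a * b + c) % 123454321 := by
  conv_lhs => rw [Int.add_emod, Int.mul_emod, m_mod_mod]
  conv_rhs => rw [Int.add_emod, Int.mul_emod]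

theorem m_comb (t p s0 : Int) :
    (t % 123454321 * (p % 123454321) + 123432 * (s0 % 123454321)) % 123454321 =
      (t * p + 123432 * s0) % 123454321 := by
  conv_lhs => rw [Int.add_emod, m_mul_mod, Int.mul_emod 123432, m_mod_mod, ← Int.mul_emod]
  conv_rhs => rw [Int.add_emod]

theorem pvGeo_correct_aux (n : Nat) :
    ∀ g : Int, g.toNat ≤ n →
      pvGeo (1000000 % 123454321) g 123454321 =
        (1000000 ^ g.toNat % 123454321, pureS g.toNat % 123454321) := by
  induction n with
  | zero =>
    intro g hn
    have hg : g ≤ 0 := by omega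
    rw [pvGeo.eq_def, dif_pos hg]
    have : g.toNat = 0 := by omega
    rw [this]
    norm_num [pureS]
  | succ n ih =>
    intro g hn
    by_cases hg : g ≤ 0
    · rw [pvGeo.eq_def, dif_pos hg]
      have : g.toNat = 0 := by omega
      rw [this]
      norm_num [pureS]
    · rw [pvGeo.eq_def, dif_neg hg]
      rw [PySem.Int.floordiv_eq_ediv_of_pos (by norm_num)]
      rw [ih (g / 2) (by omega)]
      set q := (g / 2).toNat with hq
      have hgt : g.toNat = q + q + (g % 2).toNat := by omega
      have hp2 : (1000000 : Int) ^ q % 123454321 * ((1000000 : Int) ^ q % 123454321) %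
          123454321 = (1000000 : Int) ^ (q + q) % 123454321 := by
        rw [m_mul_mod, ← pow_add]
      have ht2 : (pureS q % 123454321 * ((1000000 : Int) ^ q % 123454321) +
          pureS q % 123454321) % 123454321 = pureS (q + q) % 123454321 := by
        rw [Int.add_emod, m_mul_mod, m_mod_mod, ← Int.add_emod, ← pureS_add]
      by_cases hpar : g % 2 ≠ 0
      · rw [if_pos hpar]
        have h2 : (g % 2).toNat = 1 := by omega
        simp only [hgt, h2]
        simp only [Prod.mk.injEq]
        constructor
        · rw [hp2, m_mul_mod, ← pow_succ]
        · rw [ht2]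
          rw [Int.add_emod, m_mul_mod, ← Int.add_emod]
          rw [show pureS (q + q + 1) = pureS (q + q) * 1000000 + 1 from rfl]
      · rw [if_neg hpar]
        have h2 : (g % 2).toNat = 0 := by omega
        simp only [hgt, h2, Nat.add_zero]
        simp only [Prod.mk.injEq]
        exact ⟨hp2, ht2⟩

theorem pvGeo_correct (g : Int) :
    pvGeo (1000000 % 123454321) g 123454321 =
      (1000000 ^ g.toNat % 123454321, pureS g.toNat % 123454321) :=
  pvGeo_correct_aux g.toNat g le_rfl

-- g full blocks, pure form
theorem whileA2_blocks (i : Int) (g : Nat) :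
    ∀ f v : Int, f + 15 * (g : Int) ≤ i →
      whileA2 i f v 0 =
        whileA2 i (f + 15 * (g : Int)) (v * 1000000 ^ g + 123432 * pureS g) 0 := by
  induction g with
  | zero => intro f v h; norm_num [pureS]
  | succ g ih =>
    intro f v h
    have h15 : f + (15 - pvPreB 0) ≤ i := by
      have : pvPreB 0 = 0 := by decide
      push_cast at h
      omega
    rw [whileA2_tail i f v 0 (by norm_num) (by norm_num) h15]
    have e0 : pvPreB 0 = 0 := by decide
    have e1 : pvPnumB 0 = 0 := by decide
    have e2 : ((6 : Int) - 0).toNat = 6 := by decide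
    rw [e0, e1, e2]
    rw [ih (f + (15 - 0)) (v * 10 ^ 6 + (123432 - 0 * 10 ^ 6)) (by push_cast at h ⊢; omega)]
    have ha : f + (15 - 0) + 15 * (g : Int) = f + 15 * ((g : Nat) + 1 : Nat) := by
      push_cast; ring
    have hv : (v * 10 ^ 6 + (123432 - 0 * 10 ^ 6)) * 1000000 ^ g + 123432 * pureS g =
        v * 1000000 ^ (g + 1) + 123432 * pureS (g + 1) := by
      rw [show pureS (g + 1) = pureS (1 + g) from by rw [Nat.add_comm], pureS_add]
      norm_num [pureS]
      ring
    rw [ha, hv]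

-- A's inner for-loop over range(g), collapsed to the pure form modulo M
theorem foldA_blocks (L : List Int) (v : Int) (h : L ≠ []) :
    L.foldl (fun v _ => (v * 10 ^ 6 + 123432) % 123454321) v =
      (v * 1000000 ^ L.length + 123432 * pureS L.length) % 123454321 := by
  induction L generalizing v with
  | nil => exact absurd rfl h
  | cons x L ih =>
    by_cases hL : L = []
    · subst hL
      simp [pureS]
    · rw [List.foldl_cons, ih _ hL, m_absorb_l]
      have : (v * 10 ^ 6 + 123432) * 1000000 ^ L.length + 123432 * pureS L.length =
          v * 1000000 ^ (x :: L).length + 123432 * pureS (x :: L).length := by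
        rw [List.length_cons]
        rw [show pureS (L.length + 1) = pureS (1 + L.length) from by rw [Nat.add_comm],
          pureS_add]
        norm_num [pureS]
        ring
      rw [this]

-- the result modulo M only depends on v modulo M; f and j do not depend on v at all
theorem whileA2_mod_aux (i : Int) (n : Nat) :
    ∀ f j v w : Int, (i - f).toNat ≤ n → v % 123454321 = w % 123454321 →
      (whileA2 i f v j).1 = (whileA2 i f w j).1 ∧
        (whileA2 i f v j).2.2 = (whileA2 i f w j).2.2 ∧
        (whileA2 i f v j).2.1 % 123454321 = (whileA2 i f w j).2.1 % 123454321 := by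
  induction n with
  | zero =>
    intro f j v w hn hvw
    rw [whileA2_exit i f v j (by omega), whileA2_exit i f w j (by omega)]
    exact ⟨rfl, rfl, hvw⟩
  | succ n ih =>
    intro f j v w hn hvw
    by_cases h : f < i ∧ 1 ≤ pvDA j
    · rw [whileA2_step i f v j h.1 h.2, whileA2_step i f w j h.1 h.2]
      refine ih _ _ _ _ (by have := h.2; omega) ?_
      omega
    · have hs : ∀ u : Int, whileA2 i f u j = (f, u, j) := fun u => by
        rw [whileA2.eq_def, dif_neg h]
      rw [hs v, hs w]
      exact ⟨rfl, rfl, hvw⟩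

theorem whileA2_mod (i f j v w : Int) (hvw : v % 123454321 = w % 123454321) :
    (whileA2 i f v j).1 = (whileA2 i f w j).1 ∧
      (whileA2 i f v j).2.2 = (whileA2 i f w j).2.2 ∧
      (whileA2 i f v j).2.1 % 123454321 = (whileA2 i f w j).2.1 % 123454321 :=
  whileA2_mod_aux i (i - f).toNat f j v w le_rfl hvw

-- range(a,b) is empty when b ≤ a
theorem pyRange_empty (a b : Int) (h : b ≤ a) : PySem.List.pyRange a b 1 = [] := by
  rw [PySem.List.pyRange_one]
  have : (b - a).toNat = 0 := by omega
  rw [this]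
  rfl

-- packaging the per-iteration output
theorem pair_out (j2 s V W : Int) (h : V % 123454321 = W % 123454321) :
    ((j2 : Int), (s + V % 123454321) % 123454321) = (j2, (W + s) % 123454321) := by
  have hsw : (s + V % 123454321) % 123454321 = (W + s) % 123454321 := by omega
  rw [hsw]

-- both loop bodies compute the same function of (j, s, i) on aligned states
theorem bodyA_eq (i j s j2 : Int) (hi : 1 ≤ i) (hj0 : 0 ≤ j) (hj6 : j < 6)
    (hj20 : 0 ≤ j2) (hj26 : j2 < 6) (hal : (i + pvPreB j) % 15 = pvPreB j2) :
    bodyA (j, s) i = (j2, ((whileA2 i 0 0 j).2.1 + s) % 123454321) := by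
  obtain ⟨⟨hj10, hj16⟩, hexit⟩ := whileA1_exit i 0 0 j hj0 hj6
  have hdec := whileA1_continue i 0 0 j
  have hex := whileA2_exact i 0 0 j j2 hj0 hj6 hj20 hj26 (by omega) (by omega)
  have hmono := whileA2_f_le i (whileA1 i 0 0 j).1 (whileA1 i 0 0 j).2.1 (whileA1 i 0 0 j).2.2
  rw [← hdec] at hmono
  have hf1le : (whileA1 i 0 0 j).1 ≤ i := by omega
  simp only [bodyA]
  rw [PySem.Int.floordiv_eq_ediv_of_pos (by norm_num : (0 : Int) < 15)]
  set f1 := (whileA1 i 0 0 j).1 with hf1d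
  set v1 := (whileA1 i 0 0 j).2.1 with hv1d
  set j1 := (whileA1 i 0 0 j).2.2 with hj1d
  set g := (i - f1) / 15 with hgd
  have hg0 : 0 ≤ g := by omega
  by_cases hgz : g = 0
  · rw [hgz, pyRange_empty 0 0 le_rfl]
    simp only [List.foldl_nil, zero_mul, add_zero]
    rw [← hdec, hex.2]
  · have hj1z : j1 = 0 := by
      rcases hexit with h | h
      · exact h
      · exfalso; omega
    rw [hj1z] at hdec
    have hlen : (PySem.List.pyRange 0 g 1).length = g.toNat := by
      rw [PySem.List.length_pyRange_one, sub_zero]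
    have hne : PySem.List.pyRange 0 g 1 ≠ [] := by
      intro hnil
      rw [hnil] at hlen
      simp at hlen
      omega
    rw [hj1z, foldA_blocks _ v1 hne, hlen]
    have hble : f1 + 15 * (g.toNat : Int) ≤ i := by omega
    have hblocks := whileA2_blocks i g.toNat f1 v1 hble
    have harg : f1 + g * 15 = f1 + 15 * (g.toNat : Int) := by omega
    rw [harg]
    obtain ⟨hm1, hm2, hm3⟩ := whileA2_mod i (f1 + 15 * (g.toNat : Int)) 0
      ((v1 * 1000000 ^ g.toNat + 123432 * pureS g.toNat) % 123454321)
      (v1 * 1000000 ^ g.toNat + 123432 * pureS g.toNat) (m_mod_mod _)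
    simp only [Prod.mk.injEq]
    constructor
    · rw [hm2, ← hblocks, ← hdec, hex.2]
    · have hv : (whileA2 i (f1 + 15 * (g.toNat : Int))
          ((v1 * 1000000 ^ g.toNat + 123432 * pureS g.toNat) % 123454321) 0).2.1 % 123454321 =
          (whileA2 i 0 0 j).2.1 % 123454321 := by
        rw [hm3, ← hblocks, ← hdec]
      omega

-- the crossing-chunk value of the reference run, in the closed form B computes
theorem cross_val (i j j2 g : Int) (hj0 : 0 ≤ j) (hj6 : j < 6) (hj20 : 0 ≤ j2) (hj26 : j2 < 6)
    (hi : 1 ≤ i) (h15 : 15 ≤ pvPreB j + i) (hal : (pvPreB j + i) % 15 = pvPreB j2)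
    (hg : g = (pvPreB j + i - pvPreB j2 - 15) / 15) :
    whileA2 i 0 0 j =
      (i, ((123432 - pvPnumB j * 10 ^ (6 - j).toNat) * 1000000 ^ g.toNat +
            123432 * pureS g.toNat) * 10 ^ j2.toNat +
          (pvPnumB j2 - pvPnumB 0 * 10 ^ j2.toNat), j2) := by
  obtain ⟨-, -, -, -, hc0, hc15⟩ := step_facts j hj0 hj6
  obtain ⟨-, -, -, -, he0, he15⟩ := step_facts j2 hj20 hj26
  have hpre0 : pvPreB 0 = 0 := by decide
  have hg15 : 15 * g = pvPreB j + i - pvPreB j2 - 15 := by omega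
  have hg0 : 0 ≤ g := by omega
  have htail := whileA2_tail i 0 0 j hj0 hj6 (by omega)
  rw [show (0 : Int) * 10 ^ (6 - j).toNat + (123432 - pvPnumB j * 10 ^ (6 - j).toNat) =
      123432 - pvPnumB j * 10 ^ (6 - j).toNat by ring] at htail
  rw [show (0 : Int) + (15 - pvPreB j) = 15 - pvPreB j by ring] at htail
  have htb := whileA2_blocks i g.toNat (15 - pvPreB j)
    (123432 - pvPnumB j * 10 ^ (6 - j).toNat) (by omega)
  have hfb : 15 - pvPreB j + 15 * (g.toNat : Int) = i - pvPreB j2 := by omega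
  rw [hfb] at htb
  have htw := whileA2_within i j2 0 (i - pvPreB j2)
    ((123432 - pvPnumB j * 10 ^ (6 - j).toNat) * 1000000 ^ g.toNat + 123432 * pureS g.toNat)
    le_rfl hj20 hj26 (by omega) (by rw [hpre0]; omega)
  rw [htail, htb, htw, show j2 - 0 = j2 by ring]

theorem bodyB_eq (i j s j2 : Int) (hi : 1 ≤ i) (hj0 : 0 ≤ j) (hj6 : j < 6)
    (hj20 : 0 ≤ j2) (hj26 : j2 < 6) (hal : (i + pvPreB j) % 15 = pvPreB j2) :
    bodyB (j, s) i = (j2, ((whileA2 i 0 0 j).2.1 + s) % 123454321) := by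
  obtain ⟨-, -, -, -, hc0, hc15⟩ := step_facts j hj0 hj6
  obtain ⟨-, -, -, -, he0, he15⟩ := step_facts j2 hj20 hj26
  have he : (pvPreB j + i) % 15 = pvPreB j2 := by omega
  simp only [bodyB]
  rw [he, idx_pre j2 hj20 hj26]
  by_cases hsplit : pvPreB j + i < 15
  · rw [if_pos hsplit]
    have he2 : pvPreB j2 = pvPreB j + i := by omega
    have hjlt : j < j2 := (pre_mono j j2 hj0 hj6 hj20 hj26).1 (by omega)
    rw [whileA2_within i j2 j 0 0 hj0 (by omega) hj26 (by omega) (by omega)]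
    dsimp only
    rw [show (0 : Int) * 10 ^ (j2 - j).toNat + (pvPnumB j2 - pvPnumB j * 10 ^ (j2 - j).toNat) =
        pvPnumB j2 - pvPnumB j * 10 ^ (j2 - j).toNat by ring]
    exact pair_out j2 s _ _ rfl
  · rw [if_neg hsplit]
    rw [PySem.Int.floordiv_eq_ediv_of_pos (by norm_num : (0 : Int) < 15)]
    rw [pvGeo_correct]
    rw [cross_val i j j2 ((pvPreB j + i - pvPreB j2 - 15) / 15) hj0 hj6 hj20 hj26 hi
      (by omega) he rfl]
    dsimp only
    rw [m_comb, m_absorb_l]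
    rw [show pvPnumB 0 = 0 from by decide]
    rw [show pvPnumB j2 - 0 * 10 ^ j2.toNat = pvPnumB j2 by ring]
    exact pair_out j2 s _ _ rfl

-- triangular numbers modulo 15 always hit a block prefix sum
theorem mem15 (r : Int) (h : r = 0 ∨ r = 1 ∨ r = 3 ∨ r = 6 ∨ r = 10 ∨ r = 13) :
    ∃ j2 : Int, 0 ≤ j2 ∧ j2 < 6 ∧ r = pvPreB j2 := by
  rcases h with rfl | rfl | rfl | rfl | rfl | rfl
  exacts [⟨0, by decide⟩, ⟨1, by decide⟩, ⟨2, by decide⟩, ⟨3, by decide⟩, ⟨4, by decide⟩,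
    ⟨5, by decide⟩]

theorem tri_mem (n : Int) (hn : 0 ≤ n) :
    ∃ j2 : Int, 0 ≤ j2 ∧ j2 < 6 ∧ (n * (n + 1) / 2) % 15 = pvPreB j2 := by
  obtain ⟨u, hu⟩ := Int.even_mul_succ_self n
  have hT : n * (n + 1) / 2 = u := by omega
  rw [hT]
  obtain ⟨q, a, hqa, ha0, ha30⟩ : ∃ q a : Int, n = 30 * q + a ∧ 0 ≤ a ∧ a < 30 :=
    ⟨n / 30, n % 30, by omega, by omega, by omega⟩
  obtain ⟨t, ht⟩ := Int.even_mul_succ_self a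
  have key : 2 * u - 2 * t = 30 * (30 * q * q + 2 * q * a + q) := by
    calc 2 * u - 2 * t = n * (n + 1) - a * (a + 1) := by omega
      _ = 30 * (30 * q * q + 2 * q * a + q) := by rw [hqa]; ring
  have hmod : u % 15 = t % 15 := by omega
  rw [hmod]
  apply mem15
  interval_cases a <;> omega

theorem fold_inv (n : Nat) :
    ∃ j s : Int,
      (PySem.List.pyRange 1 ((n : Int) + 1) 1).foldl bodyA (0, 0) = (j, s) ∧
      (PySem.List.pyRange 1 ((n : Int) + 1) 1).foldl bodyB (0, 0) = (j, s) ∧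
      0 ≤ j ∧ j < 6 ∧ pvPreB j = ((n : Int) * ((n : Int) + 1) / 2) % 15 := by
  induction n with
  | zero =>
    refine ⟨0, 0, ?_, ?_, by norm_num, by norm_num, ?_⟩
    · simp only [Nat.cast_zero, zero_add]
      rw [pyRange_empty 1 1 le_rfl]
      rfl
    · simp only [Nat.cast_zero, zero_add]
      rw [pyRange_empty 1 1 le_rfl]
      rfl
    · simp only [Nat.cast_zero]
      decide
  | succ n ih =>
    obtain ⟨j, s, hA, hB, hj0, hj6, hinv⟩ := ih
    have hsplit : PySem.List.pyRange 1 (((n + 1 : Nat) : Int) + 1) 1 =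
        PySem.List.pyRange 1 ((n : Int) + 1) 1 ++ [(n : Int) + 1] := by
      push_cast
      exact PySem.List.pyRange_one_succ_right (by omega)
    obtain ⟨u, hu⟩ := Int.even_mul_succ_self ((n : Int))
    obtain ⟨w, hw⟩ := Int.even_mul_succ_self ((n : Int) + 1)
    have hTn : (n : Int) * ((n : Int) + 1) / 2 = u := by omega
    have hTn1 : ((n : Int) + 1) * (((n : Int) + 1) + 1) / 2 = w := by omega
    have hrel : w = u + ((n : Int) + 1) := by
      have h2 : 2 * w - 2 * u = 2 * ((n : Int) + 1) := by
        calc 2 * w - 2 * u = ((n : Int) + 1) * ((n : Int) + 1 + 1) - (n : Int) * ((n : Int) + 1) := by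
              omega
          _ = 2 * ((n : Int) + 1) := by ring
      omega
    obtain ⟨j2, hj20, hj26, hj2⟩ := tri_mem ((n : Int) + 1) (by omega)
    rw [hTn1] at hj2
    have hal : (((n : Int) + 1) + pvPreB j) % 15 = pvPreB j2 := by
      rw [hinv, hTn]
      omega
    refine ⟨j2, ((whileA2 ((n : Int) + 1) 0 0 j).2.1 + s) % 123454321, ?_, ?_, hj20, hj26, ?_⟩
    · rw [hsplit, List.foldl_append, hA, List.foldl_cons, List.foldl_nil]
      exact bodyA_eq ((n : Int) + 1) j s j2 (by omega) hj0 hj6 hj20 hj26 hal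
    · rw [hsplit, List.foldl_append, hB, List.foldl_cons, List.foldl_nil]
      exact bodyB_eq ((n : Int) + 1) j s j2 (by omega) hj0 hj6 hj20 hj26 hal
    · push_cast
      rw [hTn1]
      omega

-- ===== VERDICT (by name: the statement is the Claim_ definition above) =====
theorem problem506_spec : Claim_equal_problem506 := by
  intro m _
  unfold Spec_problem506 problem506 problem506_alt
  rcases (by omega : m ≤ 0 ∨ 0 < m) with hm | hm
  · rw [pyRange_empty 1 (m + 1) (by omega)]
    rfl
  · obtain ⟨n, rfl⟩ : ∃ n : Nat, m = (n : Int) := ⟨m.toNat, by omega⟩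
    obtain ⟨j, s, hA, hB, -⟩ := fold_inv n
    rw [hA, hB]
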